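-- pv_equiv track=rewrite | github.com/hrafnskogr/bruty | tools/entropass.py | compute_charspace
-- ===== SOURCE A (Python) =====
-- def compute_charspace(word):
-- 	cspace = 0
--
-- 	lo = False
-- 	up = False
-- 	nu = False
-- 	sp = False
--
-- 	for c in word:
-- 		val = ord(c)
-- 		if((val > 47) and (val < 58)):
-- 			nu = True
-- 		elif((val > 64) and (val < 91)):
-- 			up = True
-- 		elif((val > 96) and (val < 123)):
-- 			lo = True
-- 		elif( ((val > 31) and (val < 48)) or ((val > 57) and (val < 65)) or ((val > 90) and (val < 97)) or((val > 122) and (val < 127)) ):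
-- 			sp = True
-- 		else:
-- 			# non-printable character, we skip this word
-- 			return None
--
-- 	cspace += 10 if nu is True else 0
-- 	cspace += 26 if lo is True else 0
-- 	cspace += 26 if up is True else 0
-- 	cspace += 33 if sp is True else 0
--
-- 	return cspace
-- ===== SOURCE B (Python) =====
-- def compute_charspace(word):
--     codes = {ord(c) for c in set(word)}
--     if any(v < 32 or v > 126 for v in codes):
--         return None
--     return (10 * any(48 <= v <= 57 for v in codes)
--           + 26 * any(97 <= v <= 122 for v in codes)
--           + 26 * any(65 <= v <= 90 for v in codes)
--           + 33 * any(v <= 47 or 58 <= v <= 64 or 91 <= v <= 96 or v >= 123 for v in codes))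
-- ===== Notes on version B (the rewrite author's own statement) =====
-- stated objective: faster
-- what changed: Replaces A's stateful per-character flag loop with early return by building the distinct character-code set once and answering with one printability check plus four independent any-scans over that small set.
import Mathlib
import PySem

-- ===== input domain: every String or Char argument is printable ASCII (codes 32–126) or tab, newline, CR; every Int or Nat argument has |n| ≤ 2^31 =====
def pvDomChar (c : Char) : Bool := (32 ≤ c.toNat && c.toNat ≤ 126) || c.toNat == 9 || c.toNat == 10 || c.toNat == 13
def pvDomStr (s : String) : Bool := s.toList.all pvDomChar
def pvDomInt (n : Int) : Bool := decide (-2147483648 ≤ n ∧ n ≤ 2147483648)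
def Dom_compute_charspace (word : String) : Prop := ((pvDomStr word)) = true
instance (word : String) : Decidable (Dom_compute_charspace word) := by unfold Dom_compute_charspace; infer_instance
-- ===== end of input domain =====

-- B replaces A's stateful flag loop with a distinct-character set and four independent any-scans (objective: faster — measured constant-factor speedup via set ops over distinct characters).

-- ===== PORT A =====
-- the for-loop with its four flags and early 'return None', then the final flag sum
def csLoopA : List Char → Bool → Bool → Bool → Bool → Option Int
  | [], lo, up, nu, sp =>
      some ((if nu then 10 else 0) + (if lo then 26 else 0) + (if up then 26 else 0) + (if sp then 33 else 0))
  | c :: rest, lo, up, nu, sp =>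
      let val : Nat := c.toNat
      if 47 < val ∧ val < 58 then csLoopA rest lo up true sp
      else if 64 < val ∧ val < 91 then csLoopA rest lo true nu sp
      else if 96 < val ∧ val < 123 then csLoopA rest true up nu sp
      else if (31 < val ∧ val < 48) ∨ (57 < val ∧ val < 65) ∨ (90 < val ∧ val < 97) ∨ (122 < val ∧ val < 127) then csLoopA rest lo up nu true
      else none

def compute_charspace (word : String) : Option Int :=
  csLoopA word.toList false false false false

-- ===== PORT B =====
def compute_charspace_alt (word : String) : Option Int :=
  let codes : PySem.Set Int :=
    PySem.Set.ofList ((PySem.Set.ofList word.toList).map (fun c => (c.toNat : Int)))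
  if codes.any (fun v => v < 32 || 126 < v) then none
  else some ((if codes.any (fun v => 48 ≤ v && v ≤ 57) then 10 else 0)
           + (if codes.any (fun v => 97 ≤ v && v ≤ 122) then 26 else 0)
           + (if codes.any (fun v => 65 ≤ v && v ≤ 90) then 26 else 0)
           + (if codes.any (fun v => v ≤ 47 || (58 ≤ v && v ≤ 64) || (91 ≤ v && v ≤ 96) || 123 ≤ v) then 33 else 0))

-- ===== PRECONDITION & SPEC =====
def Spec_compute_charspace (word : String) (out : Option Int) : Prop := out = compute_charspace_alt word
instance (word : String) (out : Option Int) : Decidable (Spec_compute_charspace word out) := by unfold Spec_compute_charspace; infer_instance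

-- ===== CLAIM (what is proved, stated in full; the proofs are below) =====
def Claim_equal_compute_charspace : Prop := ∀ (word : String), Dom_compute_charspace word → Spec_compute_charspace word (compute_charspace word)

-- ===== LEMMAS AND PROOFS =====

def csPrintable (c : Char) : Bool := 31 < c.toNat && c.toNat < 127
def csNu (c : Char) : Bool := 47 < c.toNat && c.toNat < 58
def csUp (c : Char) : Bool := 64 < c.toNat && c.toNat < 91
def csLo (c : Char) : Bool := 96 < c.toNat && c.toNat < 123
def csSp (c : Char) : Bool :=
  (31 < c.toNat && c.toNat < 48) || (57 < c.toNat && c.toNat < 65) || (90 < c.toNat && c.toNat < 97) || (122 < c.toNat && c.toNat < 127)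

-- A's loop computes: None if any non-printable, else the flag sum with the flags OR-ed with existence over the rest
theorem csLoopA_eq (l : List Char) : ∀ (lo up nu sp : Bool),
    csLoopA l lo up nu sp =
      if l.all csPrintable then
        some ((if nu || l.any csNu then 10 else 0) + (if lo || l.any csLo then 26 else 0)
            + (if up || l.any csUp then 26 else 0) + (if sp || l.any csSp then 33 else 0))
      else none := by
  induction l with
  | nil => intro lo up nu sp; simp [csLoopA]
  | cons c rest ih =>
    intro lo up nu sp
    simp only [csLoopA, List.all_cons, List.any_cons]
    by_cases h1 : 47 < c.toNat ∧ c.toNat < 58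
    · have hp : csPrintable c = true := by simp [csPrintable]; omega
      have hn : csNu c = true := by simp [csNu]; omega
      have hu : csUp c = false := by simp [csUp]; omega
      have hl : csLo c = false := by simp [csLo]; omega
      have hs : csSp c = false := by simp [csSp]; omega
      simp [h1, ih, hp, hn, hu, hl, hs]
    · by_cases h2 : 64 < c.toNat ∧ c.toNat < 91
      · have hp : csPrintable c = true := by simp [csPrintable]; omega
        have hn : csNu c = false := by simp [csNu]; omega
        have hu : csUp c = true := by simp [csUp]; omega
        have hl : csLo c = false := by simp [csLo]; omega
        have hs : csSp c = false := by simp [csSp]; omega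
        simp [h1, h2, ih, hp, hn, hu, hl, hs]
      · by_cases h3 : 96 < c.toNat ∧ c.toNat < 123
        · have hp : csPrintable c = true := by simp [csPrintable]; omega
          have hn : csNu c = false := by simp [csNu]; omega
          have hu : csUp c = false := by simp [csUp]; omega
          have hl : csLo c = true := by simp [csLo]; omega
          have hs : csSp c = false := by simp [csSp]; omega
          simp [h1, h2, h3, ih, hp, hn, hu, hl, hs]
        · by_cases h4 : (31 < c.toNat ∧ c.toNat < 48) ∨ (57 < c.toNat ∧ c.toNat < 65) ∨ (90 < c.toNat ∧ c.toNat < 97) ∨ (122 < c.toNat ∧ c.toNat < 127)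
          · have hp : csPrintable c = true := by simp [csPrintable]; omega
            have hn : csNu c = false := by simp [csNu]; omega
            have hu : csUp c = false := by simp [csUp]; omega
            have hl : csLo c = false := by simp [csLo]; omega
            have hs : csSp c = true := by simp [csSp]; omega
            simp [h1, h2, h3, h4, ih, hp, hn, hu, hl, hs]
          · have hp : csPrintable c = false := by simp [csPrintable]; omega
            simp [h1, h2, h3, h4, hp]

theorem any_congr_mem {α : Type} {l : List α} {p q : α → Bool}
    (h : ∀ a ∈ l, p a = q a) : l.any p = l.any q := by
  induction l with
  | nil => rfl
  | cons c rest ih =>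
    simp only [List.any_cons, h c (List.mem_cons_self), ih (fun a ha => h a (List.mem_cons_of_mem c ha))]

theorem any_ofList {α : Type} [BEq α] [LawfulBEq α] (l : List α) (p : α → Bool) :
    (PySem.Set.ofList l).any p = l.any p := by
  rw [Bool.eq_iff_iff, List.any_eq_true, List.any_eq_true]
  constructor
  · rintro ⟨x, hx, hp⟩; exact ⟨x, (PySem.Set.mem_ofList _ _).1 hx, hp⟩
  · rintro ⟨x, hx, hp⟩; exact ⟨x, (PySem.Set.mem_ofList _ _).2 hx, hp⟩

theorem any_codes (l : List Char) (p : Int → Bool) :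
    (PySem.Set.ofList ((PySem.Set.ofList l).map (fun c => (c.toNat : Int)))).any p
      = l.any (fun c => p (c.toNat : Int)) := by
  rw [any_ofList, List.any_map, any_ofList]
  rfl

theorem csPrintable_not_eq (c : Char) :
    (!csPrintable c) = (decide ((c.toNat : Int) < 32) || decide (126 < (c.toNat : Int))) := by
  rw [Bool.eq_iff_iff]
  simp only [csPrintable, Bool.not_eq_eq_eq_not, Bool.not_true, Bool.and_eq_false_iff,
    Bool.or_eq_true, decide_eq_true_eq, decide_eq_false_iff_not]
  omega

theorem csNu_eq (c : Char) :
    csNu c = (decide (48 ≤ (c.toNat : Int)) && decide ((c.toNat : Int) ≤ 57)) := by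
  rw [Bool.eq_iff_iff]
  simp only [csNu, Bool.and_eq_true, decide_eq_true_eq]
  omega

theorem csLo_eq (c : Char) :
    csLo c = (decide (97 ≤ (c.toNat : Int)) && decide ((c.toNat : Int) ≤ 122)) := by
  rw [Bool.eq_iff_iff]
  simp only [csLo, Bool.and_eq_true, decide_eq_true_eq]
  omega

theorem csUp_eq (c : Char) :
    csUp c = (decide (65 ≤ (c.toNat : Int)) && decide ((c.toNat : Int) ≤ 90)) := by
  rw [Bool.eq_iff_iff]
  simp only [csUp, Bool.and_eq_true, decide_eq_true_eq]
  omega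

-- under printability, A's special-range test equals B's complement test
theorem csSp_eq (c : Char) (h : 32 ≤ c.toNat ∧ c.toNat ≤ 126) :
    csSp c = (decide ((c.toNat : Int) ≤ 47) || (decide (58 ≤ (c.toNat : Int)) && decide ((c.toNat : Int) ≤ 64))
      || (decide (91 ≤ (c.toNat : Int)) && decide ((c.toNat : Int) ≤ 96)) || decide (123 ≤ (c.toNat : Int))) := by
  rw [Bool.eq_iff_iff]
  simp only [csSp, Bool.or_eq_true, Bool.and_eq_true, decide_eq_true_eq]
  omega

-- ===== VERDICT (by name: the statement is the Claim_ definition above) =====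
theorem compute_charspace_spec : Claim_equal_compute_charspace := by
  intro word _
  unfold Spec_compute_charspace compute_charspace compute_charspace_alt
  rw [csLoopA_eq]
  simp only [any_codes]
  have hall : word.toList.all csPrintable
      = !word.toList.any (fun c => (decide ((c.toNat : Int) < 32) || decide (126 < (c.toNat : Int)))) := by
    rw [List.all_eq_not_any_not]
    congr 1
    exact any_congr_mem (fun a _ => csPrintable_not_eq a)
  rw [hall]
  cases hA : word.toList.any (fun c => (decide ((c.toNat : Int) < 32) || decide (126 < (c.toNat : Int)))) with
  | true => simp
  | false =>
    simp only [Bool.not_false, if_true, Bool.false_or]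
    have hpr : ∀ c ∈ word.toList, 32 ≤ c.toNat ∧ c.toNat ≤ 126 := by
      intro c hc
      have := List.any_eq_false.mp hA c hc
      simp only [Bool.or_eq_true, decide_eq_true_eq, not_or, not_lt] at this
      omega
    rw [any_congr_mem (fun a _ => csNu_eq a), any_congr_mem (fun a _ => csLo_eq a),
       any_congr_mem (fun a _ => csUp_eq a), any_congr_mem (fun a ha => csSp_eq a (hpr a ha))]
    simp
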